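-- pv_equiv track=rewrite | github.com/SimonMen65/llmsys_s25_hw4 | pipeline/pipe.py | _clock_cycles
-- ===== SOURCE A (Python) =====
-- from typing import Any, Iterable, Iterator, List, Optional, Union, Sequence, Tuple, cast
--
-- def _clock_cycles(num_batches: int, num_partitions: int) -> Iterable[List[Tuple[int, int]]]:
--     '''Generate schedules for each clock cycle.
--
--     An example of the generated schedule for m=3 and n=3 is as follows:
--
--     k (i,j) (i,j) (i,j)
--     - ----- ----- -----
--     0 (0,0)
--     1 (1,0) (0,1)
--     2 (2,0) (1,1) (0,2)
--     3       (2,1) (1,2)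
--     4             (2,2)
--
--     where k is the clock number, i is the index of micro-batch, and j is the index of partition.
--
--     Each schedule is a list of tuples. Each tuple contains the index of micro-batch and the index of partition.
--     This function should yield schedules for each clock cycle.
--     '''
--     '''Generate schedules for each clock cycle.'''
--     total_cycles = num_batches + num_partitions - 1
--
--     for clock in range(total_cycles):
--         tasks = []
--         for microbatch in range(num_batches):
--             partition = clock - microbatch
--             if 0 <= partition < num_partitions:
--                 tasks.append((microbatch, partition))
--         yield tasks
-- ===== SOURCE B (Python) =====
-- def _clock_cycles(num_batches: int, num_partitions: int):
--     '''Generate schedules for each clock cycle (direct index-range form).'''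
--     for clock in range(num_batches + num_partitions - 1):
--         lo = max(0, clock - num_partitions + 1)
--         hi = min(num_batches - 1, clock)
--         yield [(i, clock - i) for i in range(lo, hi + 1)]
-- ===== Notes on version B (the rewrite author's own statement) =====
-- stated objective: alternative
-- what changed: Each clock cycle's tasks are emitted directly from the closed-form valid microbatch interval [max(0,clock-n+1), min(m-1,clock)] instead of scanning all m microbatches per clock and filtering.
import Mathlib
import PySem

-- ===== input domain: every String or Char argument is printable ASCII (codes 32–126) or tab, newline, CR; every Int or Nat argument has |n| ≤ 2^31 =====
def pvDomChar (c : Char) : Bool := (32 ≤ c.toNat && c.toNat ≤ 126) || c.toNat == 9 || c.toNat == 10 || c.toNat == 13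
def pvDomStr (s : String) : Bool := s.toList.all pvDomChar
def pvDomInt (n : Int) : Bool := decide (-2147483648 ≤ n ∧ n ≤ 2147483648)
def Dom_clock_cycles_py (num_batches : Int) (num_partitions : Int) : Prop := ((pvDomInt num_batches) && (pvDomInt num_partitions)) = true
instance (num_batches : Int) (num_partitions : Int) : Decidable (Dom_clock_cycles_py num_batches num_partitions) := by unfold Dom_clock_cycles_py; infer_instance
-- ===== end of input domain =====

-- B emits each clock cycle's tasks directly from the closed-form valid microbatch interval
-- [max(0, clock-n+1), min(m-1, clock)] instead of scanning all microbatches per clock (objective: alternative).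

-- ===== PORT A =====
-- for each clock, scan every microbatch and keep those whose partition is in range
def clock_cycles_py (num_batches : Int) (num_partitions : Int) : List (List (Int × Int)) :=
  (PySem.List.pyRange 0 (num_batches + num_partitions - 1)).map (fun clock =>
    (PySem.List.pyRange 0 num_batches).foldl
      (fun tasks microbatch =>
        let partition := clock - microbatch
        if 0 ≤ partition ∧ partition < num_partitions then tasks ++ [(microbatch, partition)]
        else tasks) [])

-- ===== PORT B =====
-- for each clock, emit the valid microbatch interval directly
def clock_cycles_py_alt (num_batches : Int) (num_partitions : Int) : List (List (Int × Int)) :=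
  (PySem.List.pyRange 0 (num_batches + num_partitions - 1)).map (fun clock =>
    let lo := max 0 (clock - num_partitions + 1)
    let hi := min (num_batches - 1) clock
    (PySem.List.pyRange lo (hi + 1)).map (fun i => (i, clock - i)))

-- ===== PRECONDITION & SPEC =====
def Spec_clock_cycles_py (num_batches : Int) (num_partitions : Int) (out : List (List (Int × Int))) : Prop := out = clock_cycles_py_alt num_batches num_partitions
instance (num_batches : Int) (num_partitions : Int) (out : List (List (Int × Int))) : Decidable (Spec_clock_cycles_py num_batches num_partitions out) := by unfold Spec_clock_cycles_py; infer_instance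

-- ===== CLAIM (what is proved, stated in full; the proofs are below) =====
def Claim_equal_clock_cycles_py : Prop := ∀ (num_batches : Int) (num_partitions : Int), Dom_clock_cycles_py num_batches num_partitions → Spec_clock_cycles_py num_batches num_partitions (clock_cycles_py num_batches num_partitions)

-- ===== LEMMAS AND PROOFS =====

-- filtering a unit-step range by an interval condition yields the clipped range (k-length form)
lemma filter_pyRange_interval_aux (lo hi : Int) :
    ∀ (k : Nat) (a : Int),
      (PySem.List.pyRange a (a + k)).filter (fun i => decide (lo ≤ i ∧ i < hi)) =
      PySem.List.pyRange (max a lo) (min (a + k) hi) := by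
  intro k
  induction k with
  | zero =>
    intro a
    rw [PySem.List.pyRange_one_eq_nil (by omega : (a : Int) + (0 : Nat) ≤ a)]
    rw [PySem.List.pyRange_one_eq_nil (by omega : min ((a : Int) + (0 : Nat)) hi ≤ max a lo)]
    rfl
  | succ k ih =>
    intro a
    rw [PySem.List.pyRange_one_cons (by push_cast; omega : a < a + ((k + 1 : Nat) : Int))]
    rw [List.filter_cons]
    have hrec := ih (a + 1)
    have harg : a + 1 + (k : Int) = a + ((k + 1 : Nat) : Int) := by push_cast; omega
    rw [harg] at hrec
    by_cases hin : lo ≤ a ∧ a < hi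
    · simp only [hin, and_self, decide_true, if_pos]
      rw [hrec]
      have h1 : max (a + 1) lo = a + 1 := by omega
      have h2 : max a lo = a := by omega
      rw [h1, h2]
      rw [PySem.List.pyRange_one_cons (by push_cast; omega : a < min (a + ((k + 1 : Nat) : Int)) hi)]
    · simp only [decide_eq_true_eq, hin, if_neg, not_false_iff]
      rw [hrec]
      rcases (by omega : a < lo ∨ hi ≤ a) with h | h
      · have : max (a + 1) lo = max a lo := by omega
        rw [this]
      · rw [PySem.List.pyRange_one_eq_nil (by omega : min (a + ((k + 1 : Nat) : Int)) hi ≤ max (a + 1) lo)]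
        rw [PySem.List.pyRange_one_eq_nil (by omega : min (a + ((k + 1 : Nat) : Int)) hi ≤ max a lo)]

lemma filter_pyRange_interval (a b lo hi : Int) :
    (PySem.List.pyRange a b).filter (fun i => decide (lo ≤ i ∧ i < hi)) =
    PySem.List.pyRange (max a lo) (min b hi) := by
  by_cases hab : b ≤ a
  · rw [PySem.List.pyRange_one_eq_nil hab,
        PySem.List.pyRange_one_eq_nil (by omega : min b hi ≤ max a lo)]
    rfl
  · have hb : b = a + ((b - a).toNat : Int) := by omega
    rw [hb]
    exact filter_pyRange_interval_aux lo hi (b - a).toNat a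

-- the per-clock task lists of the two ports coincide
lemma tasks_eq (m n clock : Int) :
    (PySem.List.pyRange 0 m).foldl
      (fun tasks microbatch =>
        let partition := clock - microbatch
        if 0 ≤ partition ∧ partition < n then tasks ++ [(microbatch, partition)]
        else tasks) [] =
    (PySem.List.pyRange (max 0 (clock - n + 1)) (min (m - 1) clock + 1)).map
      (fun i => (i, clock - i)) := by
  have h := PySem.List.foldl_append_if
      (fun i => decide (0 ≤ clock - i ∧ clock - i < n))
      (fun i => ((i : Int), clock - i)) (PySem.List.pyRange 0 m) []
  simp only [decide_eq_true_eq] at h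
  rw [h, List.nil_append]
  have hp : (PySem.List.pyRange 0 m).filter (fun i => decide (0 ≤ clock - i ∧ clock - i < n)) =
      (PySem.List.pyRange 0 m).filter (fun i => decide (clock - n + 1 ≤ i ∧ i < clock + 1)) := by
    apply List.filter_congr
    intro i _
    simp only [decide_eq_decide]
    omega
  rw [hp, filter_pyRange_interval]
  have : min m (clock + 1) = min (m - 1) clock + 1 := by omega
  rw [this]

-- ===== VERDICT (by name: the statement is the Claim_ definition above) =====
theorem clock_cycles_py_spec : Claim_equal_clock_cycles_py := by
  intro m n _
  unfold Spec_clock_cycles_py clock_cycles_py clock_cycles_py_alt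
  apply List.map_congr_left
  intro clock _
  exact tasks_eq m n clock
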